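-- pv_equiv track=rewrite | github.com/asrulfami/PengolahanCitra | bubbleshortminmax.py | co_occurrence_matrix
-- ===== SOURCE A (Python) =====
-- def co_occurrence_matrix(matrix, unique_elements):
--     element_index = {element: idx for idx, element in enumerate(unique_elements)}
--     size = len(unique_elements)
--     co_matrix = [[0] * size for _ in range(size)]
--
--     # Traverse the matrix to count co-occurrences
--     for row in matrix:
--         for i in range(len(row)):
--             for j in range(i + 1, len(row)):
--                 co_matrix[element_index[row[i]]][element_index[row[j]]] += 1
--                 co_matrix[element_index[row[j]]][element_index[row[i]]] += 1
--
--     # Convert counts to 0, 1, or 2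
--     for i in range(size):
--         for j in range(size):
--             if co_matrix[i][j] > 1:  # Jika terdapat elemen yang sama lebih dari satu
--                 co_matrix[i][j] = 2   # Set nilai menjadi 2
--             elif co_matrix[i][j] == 1:  # Jika hanya ada satu kemunculan
--                 co_matrix[i][j] = 1
--
--     return co_matrix
-- ===== SOURCE B (Python) =====
-- def co_occurrence_matrix(matrix, unique_elements):
--     element_index = {element: idx for idx, element in enumerate(unique_elements)}
--     size = len(unique_elements)
--     # one pass per row: count occurrences per index, no pair loop
--     idx_counts = []
--     for row in matrix:
--         c = [0] * size
--         for x in row: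
--             c[element_index[x]] += 1
--         idx_counts.append(c)
--     # closed form per cell: ordered co-occurring pairs in a row = c[i]*c[j],
--     # minus the i==j self-pairs correction c[i]; capped at 2
--     return [[min(sum(c[i] * c[j] - (c[i] if i == j else 0) for c in idx_counts), 2)
--              for j in range(size)]
--             for i in range(size)]
-- ===== Notes on version B (the rewrite author's own statement) =====
-- stated objective: alternative
-- what changed: replaces A's per-row pair double-loop plus mutate-in-place cap pass by one counting pass per row and a closed-form cell value min(sum_rows(c[i]*c[j] - (c[i] if i==j else 0)), 2)
-- outside the precondition, e.g. on co_occurrence_matrix([[-2], [73]], [3, -1, -50]): A returns [[0, 0, 0], [0, 0, 0], [0, 0, 0]], B raises KeyError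
import Mathlib
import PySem

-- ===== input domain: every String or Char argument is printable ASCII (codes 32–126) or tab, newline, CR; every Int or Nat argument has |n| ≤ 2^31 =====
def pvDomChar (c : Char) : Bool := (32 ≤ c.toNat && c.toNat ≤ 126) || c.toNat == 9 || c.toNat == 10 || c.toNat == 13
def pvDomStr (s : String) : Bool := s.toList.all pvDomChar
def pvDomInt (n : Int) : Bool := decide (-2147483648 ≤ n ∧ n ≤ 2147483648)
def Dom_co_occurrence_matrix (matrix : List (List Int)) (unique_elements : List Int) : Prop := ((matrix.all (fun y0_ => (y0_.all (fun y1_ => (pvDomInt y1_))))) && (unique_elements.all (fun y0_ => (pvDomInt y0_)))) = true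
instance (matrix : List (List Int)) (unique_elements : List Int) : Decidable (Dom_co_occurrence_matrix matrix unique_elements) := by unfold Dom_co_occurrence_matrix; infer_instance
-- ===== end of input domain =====

-- B replaces A's per-row O(L²) pair double-loop and the final cap-rewrite pass by one
-- counting pass per row and a closed-form cell value min(Σ_rows (c[i]·c[j] − [i=j]·c[i]), 2).

-- ===== PORT A =====
-- element_index = {element: idx for idx, element in enumerate(unique_elements)}
def pvEIdx (ue : List Int) : PySem.Dict Int Int :=
  (PySem.List.enumerate ue 0).foldl (fun d p => d.insert p.2 p.1) PySem.Dict.empty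

-- element_index[x] (a KeyError for x absent is excluded by Pre_; Python's index is always ≥ 0)
def pvG (ue : List Int) (x : Int) : Nat := (((pvEIdx ue).get? x).getD 0).toNat

-- co_matrix[a][b] += 1
def pvBump (m : List (List Int)) (a b : Nat) : List (List Int) :=
  m.modify a (fun r => r.modify b (· + 1))

-- for i in range(len(row)): for j in range(i+1, len(row)): the two += 1 statements
def pvRowPass (ue : List Int) (m : List (List Int)) (row : List Int) : List (List Int) :=
  (PySem.List.pyRange 0 (row.length : Int)).foldl (fun m i =>
    (PySem.List.pyRange (i + 1) (row.length : Int)).foldl (fun m j =>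
      pvBump (pvBump m (pvG ue (PySem.List.pyGetD row i 0)) (pvG ue (PySem.List.pyGetD row j 0)))
             (pvG ue (PySem.List.pyGetD row j 0)) (pvG ue (PySem.List.pyGetD row i 0))) m) m

-- for i in range(size): for j in range(size): if co[i][j] > 1: co[i][j] = 2 elif co[i][j] == 1: co[i][j] = 1
def pvCapPass (size : Nat) (m0 : List (List Int)) : List (List Int) :=
  (PySem.List.pyRange 0 (size : Int)).foldl (fun m i =>
    (PySem.List.pyRange 0 (size : Int)).foldl (fun m j =>
      let v := PySem.List.pyGetD (PySem.List.pyGetD m i []) j 0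
      if v > 1 then m.modify i.toNat (fun r => r.set j.toNat 2)
      else if v = 1 then m.modify i.toNat (fun r => r.set j.toNat 1)
      else m) m) m0

def co_occurrence_matrix (matrix : List (List Int)) (unique_elements : List Int) : List (List Int) :=
  pvCapPass unique_elements.length
    (matrix.foldl (pvRowPass unique_elements)
      (List.replicate unique_elements.length (List.replicate unique_elements.length (0 : Int))))

-- ===== PORT B =====
-- c = [0]*size; for x in row: c[element_index[x]] += 1
def pvCounts (ue : List Int) (size : Nat) (row : List Int) : List Int :=
  row.foldl (fun c x => c.modify (pvG ue x) (· + 1)) (List.replicate size (0 : Int))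

def co_occurrence_matrix_alt (matrix : List (List Int)) (unique_elements : List Int) : List (List Int) :=
  let size := unique_elements.length
  let idx_counts := matrix.foldl (fun acc row => acc ++ [pvCounts unique_elements size row]) []
  (PySem.List.pyRange 0 (size : Int)).map (fun i =>
    (PySem.List.pyRange 0 (size : Int)).map (fun j =>
      min (idx_counts.foldl (fun s c =>
        s + (PySem.List.pyGetD c i 0 * PySem.List.pyGetD c j 0 -
             (if i = j then PySem.List.pyGetD c i 0 else 0))) 0) 2))

-- ===== PRECONDITION & SPEC =====
-- Pre_ excludes inputs with a row element absent from unique_elements: on a row with two or more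
-- elements A raises KeyError there, while on a shorter row A never performs the lookup and silently
-- returns the zero matrix, which B (which counts every element of every row) does not reproduce.
def Pre_co_occurrence_matrix (matrix : List (List Int)) (unique_elements : List Int) : Prop :=
  ∀ row ∈ matrix, ∀ x ∈ row, x ∈ unique_elements
instance (matrix : List (List Int)) (unique_elements : List Int) : Decidable (Pre_co_occurrence_matrix matrix unique_elements) := by unfold Pre_co_occurrence_matrix; infer_instance

def pvWitness_co_occurrence_matrix : List (List Int) × List Int := ([[1, 2], [2, 2]], [1, 2])

def Spec_co_occurrence_matrix (matrix : List (List Int)) (unique_elements : List Int) (out : List (List Int)) : Prop := out = co_occurrence_matrix_alt matrix unique_elements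
instance (matrix : List (List Int)) (unique_elements : List Int) (out : List (List Int)) : Decidable (Spec_co_occurrence_matrix matrix unique_elements out) := by unfold Spec_co_occurrence_matrix; infer_instance

-- ===== CLAIM (what is proved, stated in full; the proofs are below) =====
def Claim_equal_co_occurrence_matrix : Prop := ∀ (matrix : List (List Int)) (unique_elements : List Int), Dom_co_occurrence_matrix matrix unique_elements → Pre_co_occurrence_matrix matrix unique_elements → Spec_co_occurrence_matrix matrix unique_elements (co_occurrence_matrix matrix unique_elements)

-- ===== LEMMAS AND PROOFS =====

-- cell reads
def pvGetV (c : List Int) (i : Nat) : Int := c.getD i 0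
def pvGetM (m : List (List Int)) (i j : Nat) : Int := pvGetV (m.getD i []) j
def pvShape (m : List (List Int)) (n : Nat) : Prop :=
  m.length = n ∧ ∀ i (h : i < m.length), m[i].length = n
-- per-row index counts and the per-row contribution to a cell
def pvCnt (ue : List Int) (row : List Int) (i : Nat) : Int :=
  (row.countP (fun x => pvG ue x == i) : Int)
def pvDelta (ue : List Int) (row : List Int) (i j : Nat) : Int :=
  pvCnt ue row i * pvCnt ue row j - (if i = j then pvCnt ue row i else 0)
def pvCap (v : Int) : Int := if v > 1 then 2 else v
-- structural form of A's per-row double loop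
def pvInner (ue : List Int) (x : Int) (t : List Int) (m : List (List Int)) : List (List Int) :=
  t.foldl (fun m y => pvBump (pvBump m (pvG ue x) (pvG ue y)) (pvG ue y) (pvG ue x)) m
def pvPairs (ue : List Int) : List Int → List (List Int) → List (List Int)
  | [], m => m
  | x :: t, m => pvPairs ue t (pvInner ue x t m)

lemma pvEIdx_append (l : List Int) (y : Int) :
    pvEIdx (l ++ [y]) = (pvEIdx l).insert y (l.length : Int) := by
  unfold pvEIdx
  rw [PySem.List.enumerate_append, List.foldl_append]
  simp [PySem.List.enumerate_cons, PySem.List.enumerate_nil]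

lemma pvG_lt (ue : List Int) (x : Int) (hx : x ∈ ue) : pvG ue x < ue.length := by
  induction ue using List.reverseRecOn with
  | nil => simp at hx
  | append_singleton l y ih =>
    unfold pvG
    rw [pvEIdx_append, PySem.Dict.get?_insert]
    by_cases hxy : x = y
    · simp [hxy]
    · have hxl : x ∈ l := by
        rcases List.mem_append.mp hx with h | h
        · exact h
        · simp at h; exact absurd h hxy
      have := ih hxl
      unfold pvG at this
      simp only [if_neg hxy]
      simp only [List.length_append, List.length_singleton]
      omega

lemma pvGetV_modify_add (c : List Int) (b j : Nat) (v : Int) (hb : b < c.length) :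
    pvGetV (c.modify b (· + v)) j = pvGetV c j + if b = j then v else 0 := by
  simp only [pvGetV, List.getD_eq_getElem?_getD, List.getElem?_modify]
  by_cases hj : b = j
  · subst hj
    rw [List.getElem?_eq_getElem hb]
    simp
  · have hfun : (fun a => if b = j then a + v else a) = (id : Int → Int) := by
      funext a
      show (if b = j then a + v else a) = a
      exact if_neg hj
    rw [hfun]
    simp [hj]

lemma pvGetD_row (m : List (List Int)) (i : Nat) (hi : i < m.length) :
    m.getD i [] = m[i] := by
  rw [List.getD_eq_getElem?_getD, List.getElem?_eq_getElem hi]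
  rfl

lemma pvShape_bump {m : List (List Int)} {n : Nat} (hm : pvShape m n) (a b : Nat) :
    pvShape (pvBump m a b) n := by
  obtain ⟨h1, h2⟩ := hm
  refine ⟨by simpa [pvBump] using h1, ?_⟩
  intro i h
  simp only [pvBump, List.length_modify] at h
  simp only [pvBump]
  rw [List.getElem_modify]
  split
  · rw [List.length_modify]; exact h2 i h
  · exact h2 i h

lemma pvShape_replicate (n : Nat) : pvShape (List.replicate n (List.replicate n (0 : Int))) n := by
  refine ⟨by simp, ?_⟩
  intro i h
  simp at h
  simp [List.getElem_replicate]

lemma pvGetM_replicate (n : Nat) (i j : Nat) :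
    pvGetM (List.replicate n (List.replicate n (0 : Int))) i j = 0 := by
  simp only [pvGetM, pvGetV, List.getD_eq_getElem?_getD, List.getElem?_replicate]
  by_cases hi : i < n <;> by_cases hj : j < n <;> simp [hi, hj]

lemma pvGetM_bump {m : List (List Int)} {n : Nat} (hm : pvShape m n) {a b : Nat}
    (ha : a < n) (hb : b < n) (i j : Nat) :
    pvGetM (pvBump m a b) i j = pvGetM m i j + if a = i ∧ b = j then 1 else 0 := by
  obtain ⟨h1, h2⟩ := hm
  by_cases hia : a = i
  · subst hia
    have hi : a < m.length := by omega
    have hrow : (pvBump m a b).getD a [] = (m.getD a []).modify b (· + 1) := by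
      simp only [pvBump, List.getD_eq_getElem?_getD, List.getElem?_modify,
        List.getElem?_eq_getElem hi]
      simp
    have hlen : b < (m.getD a []).length := by
      rw [pvGetD_row m a hi, h2 a hi]; exact hb
    calc pvGetM (pvBump m a b) a j = pvGetV ((m.getD a []).modify b (· + 1)) j := by
          simp only [pvGetM, hrow]
      _ = pvGetV (m.getD a []) j + if b = j then 1 else 0 := pvGetV_modify_add _ b j 1 hlen
      _ = pvGetM m a j + if a = a ∧ b = j then 1 else 0 := by simp [pvGetM]
  · have hrow : (pvBump m a b).getD i [] = m.getD i [] := by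
      simp only [pvBump, List.getD_eq_getElem?_getD, List.getElem?_modify]
      have hfun : (fun (r : List Int) => if a = i then r.modify b (· + 1) else r)
          = (id : List Int → List Int) := by
        funext r
        show (if a = i then r.modify b (· + 1) else r) = r
        exact if_neg hia
      rw [hfun]
      simp
    simp only [pvGetM, hrow, hia, false_and, if_false, add_zero]

lemma pv_ind_and (P Q : Prop) [Decidable P] [Decidable Q] :
    (if P ∧ Q then (1 : Int) else 0) = (if P then 1 else 0) * (if Q then 1 else 0) := by
  by_cases hP : P <;> by_cases hQ : Q <;> simp [hP, hQ]

lemma pv_ite_add (c : Prop) [Decidable c] (a b : Int) :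
    (if c then a + b else 0) = (if c then a else 0) + (if c then b else 0) := by
  by_cases h : c <;> simp [h]

lemma pv_ite_ite (c d : Prop) [Decidable c] [Decidable d] :
    (if c then (if d then (1 : Int) else 0) else 0) = if c ∧ d then 1 else 0 := by
  by_cases hc : c <;> by_cases hd : d <;> simp [hc, hd]

lemma pvDelta_cons (ue : List Int) (x : Int) (t : List Int) (i j : Nat) :
    pvDelta ue (x :: t) i j
      = (if pvG ue x = i then 1 else 0) * pvCnt ue t j
        + (if pvG ue x = j then 1 else 0) * pvCnt ue t i + pvDelta ue t i j := by
  have hpq : (if pvG ue x = i then (1 : Int) else 0) * (if pvG ue x = j then 1 else 0)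
      = (if i = j then (1 : Int) else 0) * (if pvG ue x = i then 1 else 0) := by
    by_cases hP : pvG ue x = i
    · by_cases hQ : pvG ue x = j
      · have hij : i = j := hP.symm.trans hQ
        simp [hP, hij]
      · have hij : ¬ i = j := fun h => hQ (h ▸ hP)
        simp [hP, hij]
    · simp [hP]
  unfold pvDelta pvCnt
  simp only [List.countP_cons, beq_iff_eq]
  push_cast
  rw [pv_ite_add (i = j), pv_ite_ite (i = j) (pvG ue x = i), pv_ind_and (i = j) (pvG ue x = i)]
  linear_combination hpq

lemma pvInner_spec (ue : List Int) {n : Nat} (x : Int) (t : List Int) (hx : pvG ue x < n) :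
    ∀ m, pvShape m n → (∀ y ∈ t, pvG ue y < n) → pvShape (pvInner ue x t m) n ∧
      ∀ i j, pvGetM (pvInner ue x t m) i j = pvGetM m i j
        + (if pvG ue x = i then 1 else 0) * pvCnt ue t j
        + (if pvG ue x = j then 1 else 0) * pvCnt ue t i := by
  induction t with
  | nil =>
    intro m hm _
    refine ⟨hm, ?_⟩
    intro i j
    simp [pvInner, pvCnt]
  | cons y t ih =>
    intro m hm ht
    have hy : pvG ue y < n := ht y List.mem_cons_self
    have ht' : ∀ z ∈ t, pvG ue z < n := fun z hz => ht z (List.mem_cons_of_mem _ hz)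
    have hm1 : pvShape (pvBump (pvBump m (pvG ue x) (pvG ue y)) (pvG ue y) (pvG ue x)) n :=
      pvShape_bump (pvShape_bump hm _ _) _ _
    have hstep : pvInner ue x (y :: t) m
        = pvInner ue x t (pvBump (pvBump m (pvG ue x) (pvG ue y)) (pvG ue y) (pvG ue x)) := rfl
    rw [hstep]
    obtain ⟨hs, hg⟩ := ih _ hm1 ht'
    refine ⟨hs, ?_⟩
    intro i j
    rw [hg i j]
    rw [pvGetM_bump (pvShape_bump hm _ _) hy hx i j, pvGetM_bump hm hx hy i j]
    simp only [pvCnt, List.countP_cons, beq_iff_eq]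
    push_cast
    rw [pv_ind_and (pvG ue x = i) (pvG ue y = j), pv_ind_and (pvG ue y = i) (pvG ue x = j)]
    ring

lemma pvPairs_spec (ue : List Int) {n : Nat} (row : List Int) :
    ∀ m, pvShape m n → (∀ y ∈ row, pvG ue y < n) → pvShape (pvPairs ue row m) n ∧
      ∀ i j, pvGetM (pvPairs ue row m) i j = pvGetM m i j + pvDelta ue row i j := by
  induction row with
  | nil =>
    intro m hm _
    refine ⟨hm, ?_⟩
    intro i j
    simp [pvPairs, pvDelta, pvCnt]
  | cons x t ih =>
    intro m hm hrow
    have hx : pvG ue x < n := hrow x List.mem_cons_self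
    have ht : ∀ y ∈ t, pvG ue y < n := fun y hy => hrow y (List.mem_cons_of_mem _ hy)
    obtain ⟨hs1, hg1⟩ := pvInner_spec ue x t hx m hm ht
    have hstep : pvPairs ue (x :: t) m = pvPairs ue t (pvInner ue x t m) := rfl
    rw [hstep]
    obtain ⟨hs2, hg2⟩ := ih _ hs1 ht
    refine ⟨hs2, ?_⟩
    intro i j
    rw [hg2 i j, hg1 i j, pvDelta_cons]
    ring

lemma pvRowPass_outer (ue : List Int) (row : List Int) :
    ∀ (k a : Nat), a + k = row.length → ∀ m,
      (PySem.List.pyRange (a : Int) (row.length : Int)).foldl (fun m i =>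
        (PySem.List.pyRange (i + 1) (row.length : Int)).foldl (fun m j =>
          pvBump (pvBump m (pvG ue (PySem.List.pyGetD row i 0)) (pvG ue (PySem.List.pyGetD row j 0)))
                 (pvG ue (PySem.List.pyGetD row j 0)) (pvG ue (PySem.List.pyGetD row i 0))) m) m
      = pvPairs ue (row.drop a) m := by
  intro k
  induction k with
  | zero =>
    intro a ha m
    rw [PySem.List.pyRange_one_eq_nil (by exact_mod_cast (show row.length ≤ a by omega))]
    rw [List.drop_of_length_le (by omega)]
    rfl
  | succ k ih =>
    intro a ha m
    have halt_nat : a < row.length := by omega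
    have halt : (a : Int) < (row.length : Int) := by exact_mod_cast halt_nat
    rw [PySem.List.pyRange_one_cons halt]
    simp only [List.foldl_cons]
    have hcast : (a : Int) + 1 = ((a + 1 : Nat) : Int) := by push_cast; ring
    have hxv : PySem.List.pyGetD row (a : Int) 0 = row[a] := by
      rw [PySem.List.pyGetD_natCast, List.getD_eq_getElem?_getD, List.getElem?_eq_getElem halt_nat]
      rfl
    have hinner : ∀ m', (PySem.List.pyRange ((a : Int) + 1) (row.length : Int)).foldl (fun m j =>
          pvBump (pvBump m (pvG ue (PySem.List.pyGetD row (a : Int) 0)) (pvG ue (PySem.List.pyGetD row j 0)))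
                 (pvG ue (PySem.List.pyGetD row j 0)) (pvG ue (PySem.List.pyGetD row (a : Int) 0))) m'
        = pvInner ue row[a] (row.drop (a + 1)) m' := by
      intro m'
      rw [hcast]
      rw [PySem.List.foldl_pyRange_pyGetD' row 0
        (fun m y => pvBump (pvBump m (pvG ue (PySem.List.pyGetD row (a : Int) 0)) (pvG ue y))
          (pvG ue y) (pvG ue (PySem.List.pyGetD row (a : Int) 0))) m' (by positivity)]
      rw [hxv]
      simp only [Int.toNat_natCast]
      rfl
    rw [hinner]
    rw [hcast]
    rw [ih (a + 1) (by omega) (pvInner ue row[a] (row.drop (a + 1)) m)]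
    have hdrop : row.drop a = row[a] :: row.drop (a + 1) := List.drop_eq_getElem_cons halt_nat
    rw [hdrop]
    rfl

lemma pvRowPass_eq_pvPairs (ue : List Int) (row : List Int) (m : List (List Int)) :
    pvRowPass ue m row = pvPairs ue row m := by
  have h := pvRowPass_outer ue row row.length 0 (by omega) m
  simp only [Nat.cast_zero, List.drop_zero] at h
  exact h

lemma pvCounted_spec (ue : List Int) {n : Nat} (matrix : List (List Int)) :
    ∀ m, pvShape m n → (∀ row ∈ matrix, ∀ y ∈ row, pvG ue y < n) →
      pvShape (matrix.foldl (pvRowPass ue) m) n ∧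
      ∀ i j, pvGetM (matrix.foldl (pvRowPass ue) m) i j
        = pvGetM m i j + (matrix.map (fun row => pvDelta ue row i j)).sum := by
  induction matrix with
  | nil =>
    intro m hm _
    refine ⟨hm, ?_⟩
    intro i j
    simp
  | cons row rest ih =>
    intro m hm hpre
    have hr : ∀ y ∈ row, pvG ue y < n := hpre row List.mem_cons_self
    have hrest : ∀ r ∈ rest, ∀ y ∈ r, pvG ue y < n := fun r hrr => hpre r (List.mem_cons_of_mem _ hrr)
    simp only [List.foldl_cons]
    rw [pvRowPass_eq_pvPairs]
    obtain ⟨hs1, hg1⟩ := pvPairs_spec ue row m hm hr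
    obtain ⟨hs2, hg2⟩ := ih _ hs1 hrest
    refine ⟨hs2, ?_⟩
    intro i j
    rw [hg2 i j, hg1 i j]
    simp only [List.map_cons, List.sum_cons]
    ring

def pvCapStep (m : List (List Int)) (i j : Int) : List (List Int) :=
  let v := PySem.List.pyGetD (PySem.List.pyGetD m i []) j 0
  if v > 1 then m.modify i.toNat (fun r => r.set j.toNat 2)
  else if v = 1 then m.modify i.toNat (fun r => r.set j.toNat 1)
  else m

lemma pvCapPass_eq (n : Nat) (m0 : List (List Int)) :
    pvCapPass n m0 = (PySem.List.pyRange 0 (n : Int)).foldl (fun m i =>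
      (PySem.List.pyRange 0 (n : Int)).foldl (fun m j => pvCapStep m i j) m) m0 := rfl

lemma pvGetV_set (r : List Int) (b j : Nat) (w : Int) (hb : b < r.length) :
    pvGetV (r.set b w) j = if b = j then w else pvGetV r j := by
  simp only [pvGetV, List.getD_eq_getElem?_getD, List.getElem?_set]
  by_cases hj : b = j
  · subst hj
    simp [hb]
  · simp [hj]

lemma pvShape_setCell {m : List (List Int)} {n : Nat} (hm : pvShape m n) (a b : Nat) (w : Int) :
    pvShape (m.modify a (fun r => r.set b w)) n := by
  obtain ⟨h1, h2⟩ := hm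
  refine ⟨by simpa using h1, ?_⟩
  intro i h
  simp only [List.length_modify] at h
  rw [List.getElem_modify]
  split
  · rw [List.length_set]; exact h2 i h
  · exact h2 i h

lemma pvGetM_setCell {m : List (List Int)} {n : Nat} (hm : pvShape m n) {a b : Nat}
    (ha : a < n) (hb : b < n) (w : Int) (i j : Nat) :
    pvGetM (m.modify a (fun r => r.set b w)) i j
      = if a = i ∧ b = j then w else pvGetM m i j := by
  obtain ⟨h1, h2⟩ := hm
  by_cases hia : a = i
  · subst hia
    have hi : a < m.length := by omega
    have hrow : (m.modify a (fun r => r.set b w)).getD a [] = (m.getD a []).set b w := by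
      simp only [List.getD_eq_getElem?_getD, List.getElem?_modify,
        List.getElem?_eq_getElem hi]
      simp
    have hlen : b < (m.getD a []).length := by
      rw [pvGetD_row m a hi, h2 a hi]; exact hb
    show pvGetV ((m.modify a fun r => r.set b w).getD a []) j = _
    rw [hrow, pvGetV_set _ b j w hlen]
    by_cases hjb : b = j <;> simp [hjb, pvGetM]
  · have hrow : (m.modify a (fun r => r.set b w)).getD i [] = m.getD i [] := by
      simp only [List.getD_eq_getElem?_getD, List.getElem?_modify]
      have hfun : (fun (r : List Int) => if a = i then r.set b w else r)
          = (id : List Int → List Int) := by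
        funext r
        show (if a = i then r.set b w else r) = r
        exact if_neg hia
      rw [hfun]
      simp
    simp only [pvGetM, hrow, hia, false_and, if_false]

lemma pvCapStep_spec {m : List (List Int)} {n : Nat} (hm : pvShape m n) {i j : Int}
    (hi0 : 0 ≤ i) (hj0 : 0 ≤ j) (hin : i.toNat < n) (hjn : j.toNat < n) :
    pvShape (pvCapStep m i j) n ∧
    ∀ p q, pvGetM (pvCapStep m i j) p q
      = if i.toNat = p ∧ j.toNat = q then pvCap (pvGetM m p q) else pvGetM m p q := by
  have hv : PySem.List.pyGetD (PySem.List.pyGetD m i []) j 0 = pvGetM m i.toNat j.toNat := by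
    rw [PySem.List.pyGetD_of_nonneg _ _ hi0, PySem.List.pyGetD_of_nonneg _ _ hj0]
    rfl
  simp only [pvCapStep, hv]
  split_ifs with hgt heq
  · refine ⟨pvShape_setCell hm _ _ _, ?_⟩
    intro p q
    rw [pvGetM_setCell hm hin hjn 2 p q]
    by_cases hp : i.toNat = p ∧ j.toNat = q
    · obtain ⟨hp1, hp2⟩ := hp
      rw [if_pos ⟨hp1, hp2⟩, if_pos ⟨hp1, hp2⟩, ← hp1, ← hp2]
      unfold pvCap
      rw [if_pos hgt]
    · rw [if_neg hp, if_neg hp]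
  · refine ⟨pvShape_setCell hm _ _ _, ?_⟩
    intro p q
    rw [pvGetM_setCell hm hin hjn 1 p q]
    by_cases hp : i.toNat = p ∧ j.toNat = q
    · obtain ⟨hp1, hp2⟩ := hp
      rw [if_pos ⟨hp1, hp2⟩, if_pos ⟨hp1, hp2⟩, ← hp1, ← hp2]
      unfold pvCap
      rw [if_neg hgt, heq]
    · rw [if_neg hp, if_neg hp]
  · refine ⟨hm, ?_⟩
    intro p q
    by_cases hp : i.toNat = p ∧ j.toNat = q
    · obtain ⟨hp1, hp2⟩ := hp
      rw [if_pos ⟨hp1, hp2⟩, ← hp1, ← hp2]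
      unfold pvCap
      rw [if_neg hgt]
    · rw [if_neg hp]

lemma pvCapInner {n : Nat} (i : Int) (hi0 : 0 ≤ i) (hin : i.toNat < n) :
    ∀ (k b : Nat), b + k = n → ∀ m, pvShape m n →
      pvShape ((PySem.List.pyRange (b : Int) (n : Int)).foldl (fun m j => pvCapStep m i j) m) n ∧
      ∀ p q, pvGetM ((PySem.List.pyRange (b : Int) (n : Int)).foldl (fun m j => pvCapStep m i j) m) p q
        = if p = i.toNat ∧ b ≤ q ∧ q < n then pvCap (pvGetM m p q) else pvGetM m p q := by
  intro k
  induction k with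
  | zero =>
    intro b hb m hm
    rw [PySem.List.pyRange_one_eq_nil (a := (b : Int)) (b := (n : Int))
      (by exact_mod_cast (show n ≤ b by omega))]
    refine ⟨hm, ?_⟩
    intro p q
    have hfalse : ¬ (p = i.toNat ∧ b ≤ q ∧ q < n) := by omega
    simp [hfalse]
  | succ k ih =>
    intro b hb m hm
    have hbn : b < n := by omega
    have hblt : (b : Int) < (n : Int) := by exact_mod_cast hbn
    rw [PySem.List.pyRange_one_cons hblt]
    simp only [List.foldl_cons]
    have hcast : (b : Int) + 1 = ((b + 1 : Nat) : Int) := by push_cast; ring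
    rw [hcast]
    obtain ⟨hs1, hg1⟩ := pvCapStep_spec (i := i) (j := (b : Int)) hm hi0 (by positivity) hin
      (by rw [Int.toNat_natCast]; exact hbn)
    simp only [Int.toNat_natCast] at hg1
    obtain ⟨hs2, hg2⟩ := ih (b + 1) (by omega) (pvCapStep m i (b : Int)) hs1
    refine ⟨hs2, ?_⟩
    intro p q
    rw [hg2 p q, hg1 p q]
    split_ifs <;> first | rfl | omega

lemma pvCapOuter {n : Nat} :
    ∀ (k a : Nat), a + k = n → ∀ m, pvShape m n →
      pvShape ((PySem.List.pyRange (a : Int) (n : Int)).foldl (fun m i =>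
        (PySem.List.pyRange 0 (n : Int)).foldl (fun m j => pvCapStep m i j) m) m) n ∧
      ∀ p q, pvGetM ((PySem.List.pyRange (a : Int) (n : Int)).foldl (fun m i =>
        (PySem.List.pyRange 0 (n : Int)).foldl (fun m j => pvCapStep m i j) m) m) p q
        = if a ≤ p ∧ p < n ∧ q < n then pvCap (pvGetM m p q) else pvGetM m p q := by
  intro k
  induction k with
  | zero =>
    intro a ha m hm
    rw [PySem.List.pyRange_one_eq_nil (a := (a : Int)) (b := (n : Int))
      (by exact_mod_cast (show n ≤ a by omega))]
    refine ⟨hm, ?_⟩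
    intro p q
    have hfalse : ¬ (a ≤ p ∧ p < n ∧ q < n) := by omega
    simp [hfalse]
  | succ k ih =>
    intro a ha m hm
    have han : a < n := by omega
    have halt : (a : Int) < (n : Int) := by exact_mod_cast han
    rw [PySem.List.pyRange_one_cons halt]
    simp only [List.foldl_cons]
    have hcast : (a : Int) + 1 = ((a + 1 : Nat) : Int) := by push_cast; ring
    rw [hcast]
    have hinner := pvCapInner (n := n) (a : Int) (by positivity)
      (by rw [Int.toNat_natCast]; exact han) n 0 (by omega) m hm
    simp only [Int.toNat_natCast, Nat.cast_zero] at hinner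
    obtain ⟨hs1, hg1⟩ := hinner
    obtain ⟨hs2, hg2⟩ := ih (a + 1) (by omega) _ hs1
    refine ⟨hs2, ?_⟩
    intro p q
    rw [hg2 p q, hg1 p q]
    split_ifs <;> first | rfl | omega

lemma pvCounts_foldl_getV (ue : List Int) (i : Nat) (row : List Int) :
    ∀ (c0 : List Int), (∀ x ∈ row, pvG ue x < c0.length) →
      pvGetV (row.foldl (fun c x => c.modify (pvG ue x) (· + 1)) c0) i
        = pvGetV c0 i + pvCnt ue row i := by
  induction row with
  | nil => intro c0 _; simp [pvCnt]
  | cons x t ih =>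
    intro c0 hrow
    simp only [List.foldl_cons]
    rw [ih (c0.modify (pvG ue x) (· + 1))
        (by intro y hy; rw [List.length_modify]; exact hrow y (List.mem_cons_of_mem _ hy))]
    rw [pvGetV_modify_add c0 (pvG ue x) i 1 (hrow x List.mem_cons_self)]
    simp only [pvCnt, List.countP_cons]
    by_cases hxi : pvG ue x = i
    · simp [hxi]; ring
    · simp [hxi]

lemma pvCounts_getV (ue : List Int) {n : Nat} (row : List Int)
    (hrow : ∀ x ∈ row, pvG ue x < n) (i : Nat) :
    pvGetV (pvCounts ue n row) i = pvCnt ue row i := by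
  unfold pvCounts
  rw [pvCounts_foldl_getV ue i row (List.replicate n 0) (by simpa using hrow)]
  have : pvGetV (List.replicate n (0 : Int)) i = 0 := by
    simp only [pvGetV, List.getD_eq_getElem?_getD, List.getElem?_replicate]
    by_cases hi : i < n <;> simp [hi]
  rw [this, zero_add]

lemma pvCnt_nonneg (ue : List Int) (row : List Int) (i : Nat) : 0 ≤ pvCnt ue row i := by
  simp [pvCnt]

lemma pvDelta_nonneg (ue : List Int) (row : List Int) (i j : Nat) :
    0 ≤ pvDelta ue row i j := by
  unfold pvDelta
  by_cases hij : i = j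
  · subst hij
    rw [if_pos rfl]
    have h := pvCnt_nonneg ue row i
    have : pvCnt ue row i = 0 ∨ 1 ≤ pvCnt ue row i := by omega
    rcases this with h0 | h1
    · simp [h0]
    · have h2 := mul_nonneg (by linarith : (0:ℤ) ≤ pvCnt ue row i - 1) h
      nlinarith [h2]
  · simp only [if_neg hij, sub_zero]
    exact mul_nonneg (pvCnt_nonneg ue row i) (pvCnt_nonneg ue row j)

lemma pvGetM_eq_getElem (m : List (List Int)) (i j : Nat) (hi : i < m.length)
    (hj : j < (m[i]).length) : pvGetM m i j = m[i][j] := by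
  simp only [pvGetM, pvGetD_row m i hi, pvGetV, List.getD_eq_getElem?_getD,
    List.getElem?_eq_getElem hj]
  rfl

lemma pvCap_min (v : Int) (hv : 0 ≤ v) : pvCap v = min v 2 := by
  unfold pvCap
  split_ifs <;> omega

-- ===== VERDICT (by name: the statement is the Claim_ definition above) =====
theorem co_occurrence_matrix_spec : Claim_equal_co_occurrence_matrix := by
  intro matrix ue _hdom hpre
  show co_occurrence_matrix matrix ue = co_occurrence_matrix_alt matrix ue
  set n := ue.length with hn
  have hg : ∀ row ∈ matrix, ∀ y ∈ row, pvG ue y < n :=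
    fun row hr y hy => pvG_lt ue y (hpre row hr y hy)
  -- characterize A
  obtain ⟨hsC, hgC⟩ := pvCounted_spec ue matrix
    (List.replicate n (List.replicate n (0 : Int))) (pvShape_replicate n) hg
  have hz : (0 : Int) = ((0 : Nat) : Int) := by simp
  have houter := pvCapOuter (n := n) n 0 (by omega)
    (matrix.foldl (pvRowPass ue) (List.replicate n (List.replicate n (0 : Int)))) hsC
  rw [← hz] at houter
  obtain ⟨hsA, hgA⟩ := houter
  have hA : co_occurrence_matrix matrix ue
      = (PySem.List.pyRange 0 (n : Int)).foldl (fun m i =>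
          (PySem.List.pyRange 0 (n : Int)).foldl (fun m j => pvCapStep m i j) m)
        (matrix.foldl (pvRowPass ue) (List.replicate n (List.replicate n (0 : Int)))) := by
    rw [co_occurrence_matrix, pvCapPass_eq]
  -- characterize B
  have hB : co_occurrence_matrix_alt matrix ue
      = (PySem.List.pyRange 0 (n : Int)).map (fun i =>
          (PySem.List.pyRange 0 (n : Int)).map (fun j =>
            min ((matrix.map (pvCounts ue n)).foldl (fun s c =>
              s + (PySem.List.pyGetD c i 0 * PySem.List.pyGetD c j 0 -
                   (if i = j then PySem.List.pyGetD c i 0 else 0))) 0) 2)) := by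
    rw [co_occurrence_matrix_alt]
    rw [PySem.List.foldl_append_singleton_eq_map (pvCounts ue n) matrix []]
    rw [List.nil_append]
  rw [hA, hB]
  have hlenrange : (PySem.List.pyRange 0 (n : Int)).length = n := by
    rw [PySem.List.length_pyRange_one]
    omega
  apply List.ext_getElem
  · rw [hsA.1, List.length_map, hlenrange]
  intro p h1 h2
  have hpn : p < n := by
    rw [List.length_map, hlenrange] at h2
    exact h2
  have hrow : ((PySem.List.pyRange 0 (n : Int)).map (fun i =>
      (PySem.List.pyRange 0 (n : Int)).map (fun j =>
        min ((matrix.map (pvCounts ue n)).foldl (fun s c =>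
          s + (PySem.List.pyGetD c i 0 * PySem.List.pyGetD c j 0 -
               (if i = j then PySem.List.pyGetD c i 0 else 0))) 0) 2)))[p]
      = (PySem.List.pyRange 0 (n : Int)).map (fun j =>
        min ((matrix.map (pvCounts ue n)).foldl (fun s c =>
          s + (PySem.List.pyGetD c (p : Int) 0 * PySem.List.pyGetD c j 0 -
               (if (p : Int) = j then PySem.List.pyGetD c (p : Int) 0 else 0))) 0) 2) := by
    rw [List.getElem_map]
    rw [PySem.List.getElem_pyRange_one 0 (n : Int) p (by rw [hlenrange]; exact hpn)]
    rw [zero_add]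
  rw [hrow]
  apply List.ext_getElem
  · rw [hsA.2 p h1, List.length_map, hlenrange]
  intro q h3 h4
  have hqn : q < n := by
    rw [List.length_map, hlenrange] at h4
    exact h4
  -- right side entry
  rw [List.getElem_map]
  rw [PySem.List.getElem_pyRange_one 0 (n : Int) q (by rw [hlenrange]; exact hqn)]
  rw [zero_add]
  -- evaluate the fold as a sum
  rw [PySem.List.foldl_add (matrix.map (pvCounts ue n))
    (fun c => PySem.List.pyGetD c (p : Int) 0 * PySem.List.pyGetD c (q : Int) 0 -
      (if (p : Int) = (q : Int) then PySem.List.pyGetD c (p : Int) 0 else 0)) 0]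
  rw [zero_add, List.map_map]
  have hmapeq : (matrix.map ((fun c => PySem.List.pyGetD c (p : Int) 0 * PySem.List.pyGetD c (q : Int) 0 -
        (if (p : Int) = (q : Int) then PySem.List.pyGetD c (p : Int) 0 else 0)) ∘ pvCounts ue n))
      = matrix.map (fun row => pvDelta ue row p q) := by
    apply List.map_congr_left
    intro row hrow
    have hcv : ∀ (k : Nat), PySem.List.pyGetD (pvCounts ue n row) (k : Int) 0 = pvCnt ue row k := by
      intro k
      rw [PySem.List.pyGetD_natCast]
      exact pvCounts_getV ue row (hg row hrow) k
    simp only [Function.comp_apply, hcv, Nat.cast_inj, pvDelta]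
  rw [hmapeq]
  -- left side entry
  have hlA : p < ((PySem.List.pyRange 0 (n : Int)).foldl (fun m i =>
      (PySem.List.pyRange 0 (n : Int)).foldl (fun m j => pvCapStep m i j) m)
      (matrix.foldl (pvRowPass ue) (List.replicate n (List.replicate n (0 : Int))))).length := h1
  rw [← pvGetM_eq_getElem _ p q h1 h3]
  rw [hgA p q]
  rw [if_pos ⟨Nat.zero_le p, hpn, hqn⟩]
  rw [hgC p q, pvGetM_replicate, zero_add]
  exact pvCap_min _ (List.sum_nonneg (by
    intro v hv
    obtain ⟨row, _, hrv⟩ := List.mem_map.mp hv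
    rw [← hrv]
    exact pvDelta_nonneg ue row p q))
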